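-- pv_equiv track=rewrite | github.com/thegridelectric/g-node-factory | src/gnf/property_format.py | check_is_lru_alias_format
-- ===== SOURCE A (Python) =====
-- def check_is_lru_alias_format(candidate: str):
--     """AlphanumericStrings separated by underscores, with most
--     significant word to the left.  I.e. `dw1.ne` is the child of `dw1`.
--     Checking the format cannot verify the significance of words. All
--     words must be alphanumeric. Most significant word must start with
--     an alphabet charecter"""
--     try:
--         x = candidate.split("_")
--     except:
--         return False
--     for word in x:
--         if not word.isalnum():
--             return False
--     return True
-- ===== SOURCE B (Python) =====
-- def check_is_lru_alias_format(candidate: str):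
--     """Single left-to-right character scan: track the current word's length;
--     an underscore must close a non-empty word, every other character must be
--     alphanumeric, and the final word must be non-empty."""
--     try:
--         count = 0
--         for ch in candidate:
--             if ch == "_":
--                 if count == 0:
--                     return False
--                 count = 0
--             else:
--                 if not ch.isalnum():
--                     return False
--                 count += 1
--         return count > 0
--     except TypeError:
--         return False
-- ===== Notes on version B (the rewrite author's own statement) =====
-- stated objective: alternative
-- what changed: Replaces split-on-underscore followed by a per-word isalnum loop with a single left-to-right character scan that tracks the current word's length.
import Mathlib
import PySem

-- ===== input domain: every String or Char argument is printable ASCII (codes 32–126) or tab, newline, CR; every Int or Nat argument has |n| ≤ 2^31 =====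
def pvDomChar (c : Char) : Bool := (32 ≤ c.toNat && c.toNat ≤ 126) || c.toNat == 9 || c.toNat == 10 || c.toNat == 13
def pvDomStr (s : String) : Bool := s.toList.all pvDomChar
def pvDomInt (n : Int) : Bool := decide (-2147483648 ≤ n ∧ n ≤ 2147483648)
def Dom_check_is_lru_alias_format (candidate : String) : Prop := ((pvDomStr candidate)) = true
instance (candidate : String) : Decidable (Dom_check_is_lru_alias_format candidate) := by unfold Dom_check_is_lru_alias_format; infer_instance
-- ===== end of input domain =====

-- B replaces split('_')-then-check-each-word with a single character scan tracking the
-- current word's length (alternative decomposition, same O(n) cost).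


-- ===== PORT A =====
-- the `for word in x: if not word.isalnum(): return False` loop
def pvAWords : List String → Bool
  | [] => true
  | w :: ws => if !(PySem.Str.strIsalnum w) then false else pvAWords ws

-- `candidate.split("_")` never raises on a str, so the except branch is unreachable;
-- split? returns none only for an empty separator, which "_" is not.
def check_is_lru_alias_format (candidate : String) : Bool :=
  match PySem.Str.split? candidate "_" with
  | none => false
  | some x => pvAWords x

-- ===== PORT B =====
-- the character scan of Source B: `count` is the length of the current word
def pvAltGo : List Char → Nat → Bool
  | [], count => decide (0 < count)
  | ch :: rest, count =>
      if ch = '_' then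
        if count = 0 then false else pvAltGo rest 0
      else
        if !(PySem.Chars.isalnum ch) then false else pvAltGo rest (count + 1)

def check_is_lru_alias_format_alt (candidate : String) : Bool :=
  pvAltGo candidate.toList 0

-- ===== PRECONDITION & SPEC =====
def Spec_check_is_lru_alias_format (candidate : String) (out : Bool) : Prop := out = check_is_lru_alias_format_alt candidate
instance (candidate : String) (out : Bool) : Decidable (Spec_check_is_lru_alias_format candidate out) := by unfold Spec_check_is_lru_alias_format; infer_instance

-- ===== CLAIM (what is proved, stated in full; the proofs are below) =====
def Claim_equal_check_is_lru_alias_format : Prop := ∀ (candidate : String), Dom_check_is_lru_alias_format candidate → Spec_check_is_lru_alias_format candidate (check_is_lru_alias_format candidate)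

-- ===== LEMMAS AND PROOFS =====

-- reference splitter for a single-character separator '_'
def pvSplitU : List Char → List (List Char)
  | [] => [[]]
  | c :: r =>
      if c = '_' then [] :: pvSplitU r
      else (c :: (pvSplitU r).headI) :: (pvSplitU r).tail

theorem pvSplitU_ne_nil (l : List Char) : pvSplitU l ≠ [] := by
  cases l with
  | nil => simp [pvSplitU]
  | cons c r => simp only [pvSplitU]; split <;> simp

theorem pvGo_spec (fuel : Nat) (l cur : List Char) (acc : List (List Char))
    (h : l.length ≤ fuel) :
    PySem.Chars.splitOn.go ['_'] fuel l cur acc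
      = acc.reverse ++ (pvSplitU l).modifyHead (cur.reverse ++ ·) := by
  induction fuel generalizing l cur acc with
  | zero =>
    have : l = [] := List.eq_nil_of_length_eq_zero (Nat.le_zero.mp h)
    subst this
    simp [PySem.Chars.splitOn.go, pvSplitU]
  | succ fuel ih =>
    cases l with
    | nil => simp [PySem.Chars.splitOn.go, pvSplitU]
    | cons c rest =>
      by_cases hc : c = '_'
      · subst hc
        have hpre : List.isPrefixOf ['_'] ('_' :: rest) = true := by
          simp [List.isPrefixOf]
        rw [PySem.Chars.splitOn.go]
        simp only [hpre, if_true, List.length_singleton, List.drop_succ_cons, List.drop_zero]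
        rw [ih rest [] (cur.reverse :: acc) (by simpa using Nat.le_of_succ_le_succ (by simpa using h))]
        obtain ⟨w, ws, hw⟩ : ∃ w ws, pvSplitU rest = w :: ws := by
          cases hx : pvSplitU rest with
          | nil => exact absurd hx (pvSplitU_ne_nil rest)
          | cons w ws => exact ⟨w, ws, rfl⟩
        simp [pvSplitU, hw, List.modifyHead]
      · have hpre : List.isPrefixOf ['_'] (c :: rest) = false := by
          simp only [List.isPrefixOf]
          simpa using fun h : '_' = c => hc h.symm
        rw [PySem.Chars.splitOn.go]
        simp only [hpre]
        rw [if_neg (by simp [hc, eq_comm]), ih rest (c :: cur) acc (by simpa using Nat.le_of_succ_le_succ (by simpa using h))]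
        obtain ⟨w, ws, hw⟩ : ∃ w ws, pvSplitU rest = w :: ws := by
          cases hx : pvSplitU rest with
          | nil => exact absurd hx (pvSplitU_ne_nil rest)
          | cons w ws => exact ⟨w, ws, rfl⟩
        simp [pvSplitU, hw, hc, List.modifyHead]

theorem pvSplitOn_eq (cs : List Char) :
    PySem.Chars.splitOn cs ['_'] = pvSplitU cs := by
  rw [PySem.Chars.splitOn, pvGo_spec (cs.length + 1) cs [] [] (Nat.le_succ _)]
  obtain ⟨w, ws, hw⟩ : ∃ w ws, pvSplitU cs = w :: ws := by
    cases hx : pvSplitU cs with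
    | nil => exact absurd hx (pvSplitU_ne_nil cs)
    | cons w ws => exact ⟨w, ws, rfl⟩
  simp [hw, List.modifyHead]

-- the scan computes "all words alnum" for the split with the current partial word `cur`
theorem pvScan_spec (cs cur : List Char) (hcur : cur.all PySem.Chars.isalnum = true) :
    pvAltGo cs cur.length
      = ((pvSplitU cs).modifyHead (cur ++ ·)).all PySem.Chars.strIsalnum := by
  induction cs generalizing cur with
  | nil =>
    simp only [pvSplitU, List.modifyHead, List.append_nil, List.all_cons, List.all_nil,
      Bool.and_true, pvAltGo, PySem.Chars.strIsalnum, hcur, Bool.and_true]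
    cases cur <;> simp
  | cons c rest ih =>
    by_cases hc : c = '_'
    · subst hc
      simp only [pvSplitU, if_pos rfl, List.modifyHead, List.all_cons, pvAltGo, if_pos rfl]
      by_cases h0 : cur.length = 0
      · have : cur = [] := List.eq_nil_of_length_eq_zero h0
        subst this
        simp [PySem.Chars.strIsalnum]
      · rw [if_neg h0]
        have := ih [] (by simp)
        simp only [List.length_nil] at this
        rw [this]
        obtain ⟨w, ws, hw⟩ : ∃ w ws, pvSplitU rest = w :: ws := by
          cases hx : pvSplitU rest with
          | nil => exact absurd hx (pvSplitU_ne_nil rest)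
          | cons w ws => exact ⟨w, ws, rfl⟩
        have hne : cur ≠ [] := by intro h; exact h0 (by simp [h])
        simp [hw, List.modifyHead, PySem.Chars.strIsalnum, hcur, List.isEmpty_iff, hne]
    · obtain ⟨w, ws, hw⟩ : ∃ w ws, pvSplitU rest = w :: ws := by
        cases hx : pvSplitU rest with
        | nil => exact absurd hx (pvSplitU_ne_nil rest)
        | cons w ws => exact ⟨w, ws, rfl⟩
      simp only [pvSplitU, hw, List.headI, List.tail_cons, List.modifyHead,
        List.all_cons, pvAltGo, if_neg hc]
      by_cases ha : PySem.Chars.isalnum c = true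
      · simp only [ha, Bool.not_true, Bool.false_eq_true, if_false]
        have hcur' : (cur ++ [c]).all PySem.Chars.isalnum = true := by
          simp [List.all_append, hcur, ha]
        have := ih (cur ++ [c]) hcur'
        simp only [List.length_append, List.length_singleton, hw, List.modifyHead] at this
        rw [this]
        simp [PySem.Chars.strIsalnum]
      · simp only [Bool.not_eq_true] at ha
        simp [ha, PySem.Chars.strIsalnum, List.all_append]

-- the A-side loop is List.all
theorem pvAWords_eq_all (ws : List String) :
    pvAWords ws = ws.all PySem.Str.strIsalnum := by
  induction ws with
  | nil => rfl
  | cons w ws ih =>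
    simp only [pvAWords, List.all_cons, ih]
    cases PySem.Str.strIsalnum w <;> simp

-- ===== VERDICT (by name: the statement is the Claim_ definition above) =====
theorem check_is_lru_alias_format_spec : Claim_equal_check_is_lru_alias_format := by
  intro candidate _
  unfold Spec_check_is_lru_alias_format check_is_lru_alias_format check_is_lru_alias_format_alt
  have hmap := PySem.Str.split?_map candidate "_"
  have hsplit : PySem.Chars.split? candidate.toList "_".toList
      = some (pvSplitU candidate.toList) := by
    rw [PySem.Chars.split?]
    simp only [show ("_".toList = ['_']) from rfl]
    rw [if_neg (by simp)]
    rw [pvSplitOn_eq]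
  rw [hsplit] at hmap
  cases hx : PySem.Str.split? candidate "_" with
  | none => rw [hx] at hmap; simp at hmap
  | some xs =>
    rw [hx] at hmap
    simp only [Option.map_some, Option.some.injEq] at hmap
    simp only [pvAWords_eq_all]
    have hall : xs.all PySem.Str.strIsalnum
        = (pvSplitU candidate.toList).all PySem.Chars.strIsalnum := by
      rw [← hmap, List.all_map]
      simp only [Function.comp_def, show PySem.Str.strIsalnum = fun w => PySem.Chars.strIsalnum w.toList from funext PySem.Str.strIsalnum_eq]
    rw [hall]
    have := pvScan_spec candidate.toList [] (by simp)
    simp only [List.length_nil] at this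
    rw [this]
    obtain ⟨w, ws, hw⟩ : ∃ w ws, pvSplitU candidate.toList = w :: ws := by
      cases hy : pvSplitU candidate.toList with
      | nil => exact absurd hy (pvSplitU_ne_nil _)
      | cons w ws => exact ⟨w, ws, rfl⟩
    simp [hw, List.modifyHead]
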